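-- pv_equiv track=rewrite | github.com/arnabs542/data_structure_and_algorithm_practice | recursion/permutations_and_subsets.py | is_alternating_even_odd_with_odd_start
-- ===== SOURCE A (Python) =====
-- def is_alternating_even_odd_with_odd_start(arr):
--     i = 0
--     while i < len(arr):
--         num = arr[i]
--         if i%2==0:
--             if num%2==0:
--                 return False
--         else:
--             if num%2!=0:
--                 return False
--         i+=1
--     return True
-- ===== SOURCE B (Python) =====
-- def is_alternating_even_odd_with_odd_start(arr):
--     # two staged passes over the two parity-class slices:
--     # even positions must hold odd numbers, odd positions even numbers
--     return all(x % 2 != 0 for x in arr[::2]) and all(x % 2 == 0 for x in arr[1::2])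
-- ===== Notes on version B (the rewrite author's own statement) =====
-- stated objective: alternative
-- what changed: Replaces A's single index-branched while loop by two staged passes over the position-parity slices: all elements of arr[::2] must be odd and all elements of arr[1::2] must be even.
import Mathlib
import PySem

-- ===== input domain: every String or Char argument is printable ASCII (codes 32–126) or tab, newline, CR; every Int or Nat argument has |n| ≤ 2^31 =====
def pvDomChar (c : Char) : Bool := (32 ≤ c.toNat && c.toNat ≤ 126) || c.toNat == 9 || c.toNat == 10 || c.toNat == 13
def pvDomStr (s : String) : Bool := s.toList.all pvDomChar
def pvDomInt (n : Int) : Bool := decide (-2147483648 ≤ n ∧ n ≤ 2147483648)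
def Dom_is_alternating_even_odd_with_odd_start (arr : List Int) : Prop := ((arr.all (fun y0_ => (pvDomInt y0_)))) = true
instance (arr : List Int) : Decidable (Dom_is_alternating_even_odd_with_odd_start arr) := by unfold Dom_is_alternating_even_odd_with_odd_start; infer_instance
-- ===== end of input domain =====

-- B replaces A's single index-branched while loop by two staged passes over the parity-class
-- slices arr[::2] (all odd) and arr[1::2] (all even); objective: alternative decomposition.

-- ===== PORT A =====
-- while loop over index i, branching on i % 2
def pvLoopA (arr : List Int) (i : Nat) : Bool :=
  if h : i < arr.length then
    let num := arr[i]
    if i % 2 == 0 then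
      if PySem.Int.mod num 2 == 0 then false else pvLoopA arr (i + 1)
    else
      if PySem.Int.mod num 2 != 0 then false else pvLoopA arr (i + 1)
  else true
termination_by arr.length - i

def is_alternating_even_odd_with_odd_start (arr : List Int) : Bool :=
  pvLoopA arr 0

-- ===== PORT B =====
-- hand port of the step-2 slice xs[::2] (exact: nonneg start 0, no stop, step 2 never raises);
-- arr[1::2] is then pvEveryOther (arr.drop 1)
def pvEveryOther (xs : List Int) : List Int :=
  match xs with
  | [] => []
  | [x] => [x]
  | x :: _ :: rest => x :: pvEveryOther rest

def is_alternating_even_odd_with_odd_start_alt (arr : List Int) : Bool :=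
  ((pvEveryOther arr).all (fun x => PySem.Int.mod x 2 != 0)) &&
  ((pvEveryOther (arr.drop 1)).all (fun x => PySem.Int.mod x 2 == 0))

-- ===== PRECONDITION & SPEC =====
def Spec_is_alternating_even_odd_with_odd_start (arr : List Int) (out : Bool) : Prop := out = is_alternating_even_odd_with_odd_start_alt arr
instance (arr : List Int) (out : Bool) : Decidable (Spec_is_alternating_even_odd_with_odd_start arr out) := by unfold Spec_is_alternating_even_odd_with_odd_start; infer_instance

-- ===== CLAIM (what is proved, stated in full; the proofs are below) =====
def Claim_equal_is_alternating_even_odd_with_odd_start : Prop := ∀ (arr : List Int), Dom_is_alternating_even_odd_with_odd_start arr → Spec_is_alternating_even_odd_with_odd_start arr (is_alternating_even_odd_with_odd_start arr)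

-- ===== LEMMAS AND PROOFS =====

-- the step-2 slice unfolds one cons at a time
theorem pv_everyOther_cons (x : Int) (t : List Int) :
    pvEveryOther (x :: t) = x :: pvEveryOther (t.drop 1) := by
  cases t <;> simp [pvEveryOther]

-- the boolean shape shared by both of A's branches
theorem pv_bool1 (o x y : Bool) :
    (if o then false else (x && y)) = (((!o) && y) && x) := by
  cases o <;> cases x <;> cases y <;> rfl

-- A's loop from index i computes B's two staged slice checks over the remaining suffix,
-- with the two parity roles swapped when i is odd
theorem pv_loop_eq (arr : List Int) (i : Nat) :
    pvLoopA arr i =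
      (if i % 2 == 0 then
        ((pvEveryOther (arr.drop i)).all (fun x => PySem.Int.mod x 2 != 0)) &&
        ((pvEveryOther ((arr.drop i).drop 1)).all (fun x => PySem.Int.mod x 2 == 0))
      else
        ((pvEveryOther (arr.drop i)).all (fun x => PySem.Int.mod x 2 == 0)) &&
        ((pvEveryOther ((arr.drop i).drop 1)).all (fun x => PySem.Int.mod x 2 != 0))) := by
  by_cases h : i < arr.length
  · have hdrop : arr.drop i = arr[i] :: arr.drop (i + 1) := List.drop_eq_getElem_cons h
    have hsucc : ((i + 1) % 2 == 0) = !(i % 2 == 0) := by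
      rcases Nat.mod_two_eq_zero_or_one i with h2 | h2 <;> simp [Nat.add_mod, h2]
    have IH := pv_loop_eq arr (i + 1)
    rw [pvLoopA, dif_pos h, IH, hsucc, hdrop, pv_everyOther_cons]
    simp only [List.drop_one, List.tail_cons, List.all_cons]
    cases hp : (i % 2 == 0)
    · simp only [Bool.not_false, if_true, Bool.false_eq_true, if_false]
      rw [bne, pv_bool1, Bool.not_not]
    · simp only [Bool.not_true, if_true, Bool.false_eq_true, if_false]
      rw [pv_bool1]
      simp only [bne]
  · rw [pvLoopA, dif_neg h, List.drop_eq_nil_of_le (by omega)]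
    simp [pvEveryOther]
termination_by arr.length - i

-- ===== VERDICT (by name: the statement is the Claim_ definition above) =====
theorem is_alternating_even_odd_with_odd_start_spec : Claim_equal_is_alternating_even_odd_with_odd_start := by
  intro arr _
  unfold Spec_is_alternating_even_odd_with_odd_start is_alternating_even_odd_with_odd_start
    is_alternating_even_odd_with_odd_start_alt
  rw [pv_loop_eq arr 0, List.drop_zero]
  simp
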